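-- pv_equiv track=rewrite | github.com/MartinHerr/advent-of-code-2024 | day14/solve_star_two.py | left_branch_score
-- ===== SOURCE A (Python) =====
-- def left_branch_score(pos, set_of_robots_pos, visited, map_size):
--     (x, y) = pos
--     if pos not in set_of_robots_pos:
--         return 0
--     else:
--         visited[pos] = True
--         if y < map_size[1] - 1 and 0 < x:
--             return 1 + left_branch_score((x - 1, y + 1), set_of_robots_pos, visited, map_size)
--     return 1
-- ===== SOURCE B (Python) =====
-- def left_branch_score(pos, set_of_robots_pos, visited, map_size):
--     x, y = pos
--     count = 0
--     while (x, y) in set_of_robots_pos: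
--         visited[(x, y)] = True
--         count += 1
--         if y < map_size[1] - 1 and 0 < x:
--             x, y = x - 1, y + 1
--         else:
--             break
--     return count
-- ===== Notes on version B (the rewrite author's own statement) =====
-- stated objective: idiomatic
-- what changed: Replaced the tail recursion building 1 + rec(...) with an explicit while loop over the diagonal maintaining an integer count accumulator.
import Mathlib
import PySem

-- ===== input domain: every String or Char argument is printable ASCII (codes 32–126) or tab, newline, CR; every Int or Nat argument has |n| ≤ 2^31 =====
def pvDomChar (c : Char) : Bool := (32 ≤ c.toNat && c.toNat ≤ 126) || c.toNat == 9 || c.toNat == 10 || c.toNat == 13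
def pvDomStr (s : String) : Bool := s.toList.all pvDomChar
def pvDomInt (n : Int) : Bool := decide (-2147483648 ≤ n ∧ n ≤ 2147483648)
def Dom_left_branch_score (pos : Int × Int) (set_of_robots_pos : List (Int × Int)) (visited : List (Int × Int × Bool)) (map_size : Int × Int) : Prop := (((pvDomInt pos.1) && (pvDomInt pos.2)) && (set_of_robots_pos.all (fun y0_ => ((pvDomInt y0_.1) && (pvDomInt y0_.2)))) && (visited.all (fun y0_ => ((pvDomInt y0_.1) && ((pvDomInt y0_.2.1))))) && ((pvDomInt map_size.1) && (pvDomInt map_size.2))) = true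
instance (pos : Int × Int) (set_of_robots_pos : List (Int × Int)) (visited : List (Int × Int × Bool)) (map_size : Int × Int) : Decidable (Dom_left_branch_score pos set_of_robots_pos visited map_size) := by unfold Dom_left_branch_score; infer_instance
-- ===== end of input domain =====

-- ===== PORT A =====
-- Header: B replaces A's tail recursion with an explicit counting loop; equivalence is about
-- the RETURN value only (both Pythons mark the same keys in the mutable `visited` dict).
def left_branch_score (pos : Int × Int) (set_of_robots_pos : List (Int × Int)) (visited : List (Int × Int × Bool)) (map_size : Int × Int) : Int :=
  if pos ∉ set_of_robots_pos then 0
  else if pos.2 < map_size.2 - 1 ∧ 0 < pos.1 then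
    1 + left_branch_score (pos.1 - 1, pos.2 + 1) set_of_robots_pos visited map_size
  else 1
termination_by pos.1.toNat
decreasing_by omega

-- ===== PORT B =====
-- the while loop of Source B, as a tail-recursive helper carrying the count accumulator
def lbsLoop (x y : Int) (set_of_robots_pos : List (Int × Int)) (map_size : Int × Int) (count : Int) : Int :=
  if (x, y) ∈ set_of_robots_pos then
    if y < map_size.2 - 1 ∧ 0 < x then
      lbsLoop (x - 1) (y + 1) set_of_robots_pos map_size (count + 1)
    else count + 1
  else count
termination_by x.toNat
decreasing_by omega

def left_branch_score_alt (pos : Int × Int) (set_of_robots_pos : List (Int × Int)) (visited : List (Int × Int × Bool)) (map_size : Int × Int) : Int :=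
  lbsLoop pos.1 pos.2 set_of_robots_pos map_size 0

-- ===== PRECONDITION & SPEC =====
def Spec_left_branch_score (pos : Int × Int) (set_of_robots_pos : List (Int × Int)) (visited : List (Int × Int × Bool)) (map_size : Int × Int) (out : Int) : Prop := out = left_branch_score_alt pos set_of_robots_pos visited map_size
instance (pos : Int × Int) (set_of_robots_pos : List (Int × Int)) (visited : List (Int × Int × Bool)) (map_size : Int × Int) (out : Int) : Decidable (Spec_left_branch_score pos set_of_robots_pos visited map_size out) := by unfold Spec_left_branch_score; infer_instance

-- ===== CLAIM (what is proved, stated in full; the proofs are below) =====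
def Claim_equal_left_branch_score : Prop := ∀ (pos : Int × Int) (set_of_robots_pos : List (Int × Int)) (visited : List (Int × Int × Bool)) (map_size : Int × Int), Dom_left_branch_score pos set_of_robots_pos visited map_size → Spec_left_branch_score pos set_of_robots_pos visited map_size (left_branch_score pos set_of_robots_pos visited map_size)

-- ===== LEMMAS AND PROOFS =====

-- ===== VERDICT (by name: the statement is the Claim_ definition above) =====
theorem lbsLoop_eq (x y : Int) (s : List (Int × Int)) (v : List (Int × Int × Bool)) (m : Int × Int) (c : Int) :
    lbsLoop x y s m c = c + left_branch_score (x, y) s v m := by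
  fun_induction lbsLoop x y s m c with
  | case1 x y c hmem hstep ih =>
      rw [left_branch_score.eq_def, if_neg (by simp [hmem]), if_pos hstep, ih]
      ring
  | case2 x y c hmem hstep =>
      rw [left_branch_score.eq_def, if_neg (by simp [hmem]), if_neg hstep]
  | case3 x y c hmem =>
      rw [left_branch_score.eq_def, if_pos hmem]
      ring

theorem left_branch_score_spec : Claim_equal_left_branch_score := by
  intro pos s v m _
  unfold Spec_left_branch_score left_branch_score_alt
  rw [lbsLoop_eq pos.1 pos.2 s v m 0]
  simp
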